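-- pv_equiv track=rewrite | github.com/sooda/100x7-demo | rayled.py | splitscreen
-- ===== SOURCE A (Python) =====
-- def splitscreen(src):
--     dst = [0] * 100
--     for i, v in enumerate(src):
--         blkid = i // 6
--         blksub = i % 6
--         if blksub < 5:
--             dst[5 * blkid + blksub] = v
--     return dst
-- ===== SOURCE B (Python) =====
-- def splitscreen(src):
--     # chunked rewrite: take each 6-block's first 5 elements, then pad with zeros to 100
--     kept = []
--     for j in range(0, len(src), 6):
--         kept.extend(src[j:j + 6][:5])
--     return kept + [0] * (100 - len(kept))
-- ===== Notes on version B (the rewrite author's own statement) =====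
-- stated objective: simpler
-- what changed: Replaces the per-element pass with div/mod index remapping into a preallocated 100-slot array by a chunked decomposition: slice src into 6-blocks, keep each block's first 5 elements, and pad the concatenation with zeros to length 100; lists longer than 120 (where A raises IndexError) are excluded by Pre_.
import Mathlib
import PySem

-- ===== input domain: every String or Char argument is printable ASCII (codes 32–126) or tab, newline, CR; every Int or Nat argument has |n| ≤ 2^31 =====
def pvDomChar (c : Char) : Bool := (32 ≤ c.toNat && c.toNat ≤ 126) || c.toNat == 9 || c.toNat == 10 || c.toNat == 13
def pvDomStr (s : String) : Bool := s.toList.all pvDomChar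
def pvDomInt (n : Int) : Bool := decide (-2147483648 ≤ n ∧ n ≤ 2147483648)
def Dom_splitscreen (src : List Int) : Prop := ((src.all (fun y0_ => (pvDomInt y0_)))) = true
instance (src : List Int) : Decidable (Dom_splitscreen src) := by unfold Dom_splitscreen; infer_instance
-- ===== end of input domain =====

-- B is a chunked decomposition (6-slices, keep first 5, pad with zeros); equivalence is claimed
-- for inputs of length ≤ 120, on which A returns (beyond that A raises IndexError).

-- ===== PORT A =====
-- the 'for i, v in enumerate(src)' loop, carrying the running index i
def splitscreenGo (i : Nat) (l : List Int) (dst : List Int) : List Int :=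
  match l with
  | [] => dst
  | v :: rest =>
      let blkid := i / 6
      let blksub := i % 6
      splitscreenGo (i + 1) rest (if blksub < 5 then dst.set (5 * blkid + blksub) v else dst)

def splitscreen (src : List Int) : List Int :=
  splitscreenGo 0 src (List.replicate 100 0)

-- ===== PORT B =====
-- the 'for j in range(0, len(src), 6): kept.extend(src[j:j+6][:5])' loop as chunk recursion
def splitscreenKept : List Int → List Int
  | [] => []
  | x :: rest => (x :: rest).take 5 ++ splitscreenKept ((x :: rest).drop 6)
termination_by l => l.length
decreasing_by simp

def splitscreen_alt (src : List Int) : List Int :=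
  let kept := splitscreenKept src
  kept ++ List.replicate (100 - kept.length) 0

-- ===== PRECONDITION & SPEC =====
-- Pre_ excludes exactly the inputs (length ≥ 121) on which A raises IndexError (write past dst)
def Pre_splitscreen (src : List Int) : Prop := src.length ≤ 120
instance (src : List Int) : Decidable (Pre_splitscreen src) := by unfold Pre_splitscreen; infer_instance
def pvWitness_splitscreen : List Int := [1, 2, 3, 4, 5, 6, 7]

def Spec_splitscreen (src : List Int) (out : List Int) : Prop := out = splitscreen_alt src
instance (src : List Int) (out : List Int) : Decidable (Spec_splitscreen src out) := by unfold Spec_splitscreen; infer_instance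

-- ===== CLAIM (what is proved, stated in full; the proofs are below) =====
def Claim_equal_splitscreen : Prop := ∀ (src : List Int), Dom_splitscreen src → Pre_splitscreen src → Spec_splitscreen src (splitscreen src)

-- ===== LEMMAS AND PROOFS =====

-- number of kept elements: n - n/6
theorem splitscreenKept_length (l : List Int) :
    (splitscreenKept l).length = l.length - l.length / 6 := by
  fun_induction splitscreenKept l with
  | case1 => simp [splitscreenKept]
  | case2 x rest ih =>
      simp only [List.length_append, List.length_take, List.length_drop, List.length_cons, ih]
      omega

theorem set_append_len {α : Type} (pre tail : List α) (j : Nat) (v : α) :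
    (pre ++ tail).set (pre.length + j) v = pre ++ tail.set j v := by
  induction pre with
  | nil => simp
  | cons a pre ih => simp [Nat.succ_add, ih]

theorem set_append_zero {α : Type} (pre tail : List α) (v : α) :
    (pre ++ tail).set pre.length v = pre ++ tail.set 0 v := by
  simpa using set_append_len pre tail 0 v

-- main invariant: at a block boundary i = 6*k with dst = pre ++ tail, |pre| = 5*k,
-- the loop fills tail's prefix with the kept elements of l
theorem splitscreenGo_inv : ∀ (n : Nat) (l : List Int), l.length ≤ n →
    ∀ (k : Nat) (pre tail : List Int), pre.length = 5 * k →
      (splitscreenKept l).length ≤ tail.length →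
      splitscreenGo (6 * k) l (pre ++ tail)
        = pre ++ splitscreenKept l ++ tail.drop (splitscreenKept l).length := by
  intro n
  induction n with
  | zero =>
      intro l hl k pre tail hp ht
      have hnil : l = [] := List.eq_nil_of_length_eq_zero (by omega)
      subst hnil
      simp [splitscreenGo, splitscreenKept]
  | succ n ih =>
      intro l hl k pre tail hp ht
      have htl := ht
      rw [splitscreenKept_length] at htl
      have e0 : 6 * k / 6 = k := by omega
      have m0 : 6 * k % 6 = 0 := by omega
      have e1 : (6 * k + 1) / 6 = k := by omega
      have m1 : (6 * k + 1) % 6 = 1 := by omega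
      have e2 : (6 * k + 1 + 1) / 6 = k := by omega
      have m2 : (6 * k + 1 + 1) % 6 = 2 := by omega
      have e3 : (6 * k + 1 + 1 + 1) / 6 = k := by omega
      have m3 : (6 * k + 1 + 1 + 1) % 6 = 3 := by omega
      have e4 : (6 * k + 1 + 1 + 1 + 1) / 6 = k := by omega
      have m4 : (6 * k + 1 + 1 + 1 + 1) % 6 = 4 := by omega
      have e5 : (6 * k + 1 + 1 + 1 + 1 + 1) / 6 = k := by omega
      have m5 : (6 * k + 1 + 1 + 1 + 1 + 1) % 6 = 5 := by omega
      match l, htl with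
      | [], _ => simp [splitscreenGo, splitscreenKept]
      | [a], htl =>
          simp only [List.length_cons, List.length_nil] at htl
          match tail, htl with
          | t0 :: tr, _ =>
            simp only [splitscreenGo, splitscreenKept, e0, m0]
            norm_num
            rw [← hp, set_append_zero]
            simp [splitscreenGo, splitscreenKept]
      | [a, b], htl =>
          simp only [List.length_cons, List.length_nil] at htl
          match tail, htl with
          | [], h => simp at h
          | t0 :: t1 :: tr, _ =>
            simp only [splitscreenGo, splitscreenKept, e0, m0, e1, m1]
            norm_num
            rw [← hp, set_append_zero, set_append_len]
            simp [splitscreenGo, splitscreenKept, List.set]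
      | [a, b, c], htl =>
          simp only [List.length_cons, List.length_nil] at htl
          match tail, htl with
          | [], h => simp at h
          | [t0], h => simp at h
          | t0 :: t1 :: t2 :: tr, _ =>
            simp only [splitscreenGo, splitscreenKept, e0, m0, e1, m1, e2, m2]
            norm_num
            rw [← hp, set_append_zero, set_append_len, set_append_len]
            simp [splitscreenGo, splitscreenKept, List.set]
      | [a, b, c, d], htl =>
          simp only [List.length_cons, List.length_nil] at htl
          match tail, htl with
          | [], h => simp at h
          | [t0], h => simp at h
          | [t0, t1], h => simp at h
          | t0 :: t1 :: t2 :: t3 :: tr, _ =>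
            simp only [splitscreenGo, splitscreenKept, e0, m0, e1, m1, e2, m2, e3, m3]
            norm_num
            rw [← hp, set_append_zero, set_append_len, set_append_len, set_append_len]
            simp [splitscreenGo, splitscreenKept, List.set]
      | [a, b, c, d, e], htl =>
          simp only [List.length_cons, List.length_nil] at htl
          match tail, htl with
          | [], h => simp at h
          | [t0], h => simp at h
          | [t0, t1], h => simp at h
          | [t0, t1, t2], h => simp at h
          | t0 :: t1 :: t2 :: t3 :: t4 :: tr, _ =>
            simp only [splitscreenGo, splitscreenKept, e0, m0, e1, m1, e2, m2, e3, m3, e4, m4]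
            norm_num
            rw [← hp, set_append_zero, set_append_len, set_append_len, set_append_len,
                set_append_len]
            simp [splitscreenGo, splitscreenKept, List.set]
      | a :: b :: c :: d :: e :: f :: rest, htl =>
          have htl5 : 5 ≤ tail.length := by
            simp only [List.length_cons] at htl
            omega
          match tail, htl5 with
          | [], h => simp at h
          | [t0], h => simp at h
          | [t0, t1], h => simp at h
          | [t0, t1, t2], h => simp at h
          | [t0, t1, t2, t3], h => simp at h
          | t0 :: t1 :: t2 :: t3 :: t4 :: tr, _ =>
            simp only [splitscreenGo, e0, m0, e1, m1, e2, m2, e3, m3, e4, m4, e5, m5]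
            norm_num
            rw [← hp, set_append_zero, set_append_len, set_append_len, set_append_len,
                set_append_len]
            simp only [List.set]
            have hrec := ih rest (by simp at hl ⊢; omega) (k + 1) (pre ++ [a, b, c, d, e]) tr
              (by simp; omega)
              (by
                rw [splitscreenKept_length] at ht ⊢
                simp only [List.length_cons] at ht htl ⊢
                omega)
            rw [show pre ++ a :: b :: c :: d :: e :: tr = (pre ++ [a, b, c, d, e]) ++ tr by simp]
            rw [show (6 : Nat) * k + 1 + 1 + 1 + 1 + 1 + 1 = 6 * (k + 1) by omega]
            rw [hrec]
            conv_rhs => rw [splitscreenKept]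
            simp

-- ===== VERDICT (by name: the statement is the Claim_ definition above) =====
theorem splitscreen_spec : Claim_equal_splitscreen := by
  intro src _ hpre
  unfold Spec_splitscreen splitscreen splitscreen_alt
  have hk := splitscreenKept_length src
  have hle : (splitscreenKept src).length ≤ (List.replicate 100 (0 : Int)).length := by
    simp [hk]; unfold Pre_splitscreen at hpre; omega
  have h := splitscreenGo_inv src.length src le_rfl 0 [] (List.replicate 100 0) (by simp) hle
  simp only [List.nil_append] at h
  rw [h, List.drop_replicate]
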